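-- pv_equiv track=rewrite | github.com/kgutzkow/digitale-gesamtausgabe | extra_filters.py | fancy_date
-- ===== SOURCE A (Python) =====
-- def fancy_date(date):
--     date = [part[1:] if part.startswith('0') else part for part in date.split('-')]
--     if len(date) == 1:
--         return date[0]
--     elif len(date) == 2:
--         return '{0}.{1}'.format(date[1], date[0])
--     elif len(date) == 3:
--         return '{0}.{1}.{2}'.format(date[2], date[1], date[0])
--     return ''
-- ===== SOURCE B (Python) =====
-- def fancy_date(date):
--     # Single character-level pass: no split(), no list of parts; the result is
--     # built back-to-front by prepending each finished (zero-stripped) part.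
--     acc = None
--     buf = ''
--     n = 0
--     for ch in date:
--         if ch == '-':
--             part = buf[1:] if buf[:1] == '0' else buf
--             acc = part if acc is None else part + '.' + acc
--             buf = ''
--             n += 1
--         else:
--             buf += ch
--     part = buf[1:] if buf[:1] == '0' else buf
--     acc = part if acc is None else part + '.' + acc
--     return acc if n < 3 else ''
-- ===== Notes on version B (the rewrite author's own statement) =====
-- stated objective: alternative
-- what changed: Instead of splitting into a parts list and dispatching on its length with positional format strings, B makes a single character-level pass over the string, accumulating the current part in a buffer and prepending each finished zero-stripped part to the result built back-to-front, counting dashes to decide the >3-parts empty-string case.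
import Mathlib
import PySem

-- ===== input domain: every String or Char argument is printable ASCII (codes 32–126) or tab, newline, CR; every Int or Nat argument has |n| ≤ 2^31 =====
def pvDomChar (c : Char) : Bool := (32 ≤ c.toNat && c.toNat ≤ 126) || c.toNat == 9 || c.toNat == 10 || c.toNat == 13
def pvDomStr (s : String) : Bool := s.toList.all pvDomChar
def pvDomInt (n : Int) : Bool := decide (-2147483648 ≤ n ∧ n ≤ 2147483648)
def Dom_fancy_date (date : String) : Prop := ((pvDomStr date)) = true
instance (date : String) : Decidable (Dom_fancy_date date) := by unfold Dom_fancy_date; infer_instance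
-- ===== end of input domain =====

-- B replaces split-into-parts plus length dispatch by a single character-level pass that builds the result back-to-front.


-- ===== PORT A =====
-- the comprehension body: part[1:] if part.startswith('0') else part
def fdStrip (part : String) : String :=
  if PySem.Str.startswith part "0" then PySem.Str.slice part (some 1) none else part

-- date.split('-') with the literal non-empty separator: split? is always `some`, getD unreachable
def fancy_date (date : String) : String :=
  let d := ((PySem.Str.split? date "-").getD []).map fdStrip
  match d with
  | [x] => x
  | [x, y] => y ++ "." ++ x
  | [x, y, z] => z ++ "." ++ y ++ "." ++ x
  | _ => ""

-- ===== PORT B =====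
-- part = buf[1:] if buf[:1] == '0' else buf
def fdStripC (buf : List Char) : List Char :=
  if buf.head? = some '0' then buf.tail else buf

-- acc = part if acc is None else part + '.' + acc
def fdCons (acc : Option (List Char)) (part : List Char) : List Char :=
  acc.elim part (fun a => part ++ '.' :: a)

-- one loop iteration of Source B (state: acc, buf, dash count n)
def fdStep (st : Option (List Char) × List Char × Nat) (ch : Char) :
    Option (List Char) × List Char × Nat :=
  if ch = '-' then (some (fdCons st.1 (fdStripC st.2.1)), [], st.2.2 + 1)
  else (st.1, st.2.1 ++ [ch], st.2.2)

def fancy_date_alt (date : String) : String :=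
  let st := date.toList.foldl fdStep (none, [], 0)
  if st.2.2 < 3 then String.ofList (fdCons st.1 (fdStripC st.2.1)) else ""

-- ===== PRECONDITION & SPEC =====
def Spec_fancy_date (date : String) (out : String) : Prop := out = fancy_date_alt date
instance (date : String) (out : String) : Decidable (Spec_fancy_date date out) := by unfold Spec_fancy_date; infer_instance

-- ===== CLAIM (what is proved, stated in full; the proofs are below) =====
def Claim_equal_fancy_date : Prop := ∀ (date : String), Dom_fancy_date date → Spec_fancy_date date (fancy_date date)

-- ===== LEMMAS AND PROOFS =====

-- simple structural split on '-'
def fdSp : List Char → List (List Char)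
  | [] => [[]]
  | c :: rest =>
    if c = '-' then [] :: fdSp rest
    else
      match fdSp rest with
      | [] => [[c]]
      | p :: ps => (c :: p) :: ps

theorem fdSp_ne_nil (s : List Char) : fdSp s ≠ [] := by
  cases s with
  | nil => simp [fdSp]
  | cons c rest =>
    simp only [fdSp]
    split
    · simp
    · split <;> simp_all

def fdHead (x : List Char) : List (List Char) → List (List Char)
  | [] => [x]
  | p :: ps => (x ++ p) :: ps

theorem splitOn_go_eq (s : List Char) : ∀ (fuel : ℕ) (cur : List Char) (acc : List (List Char)),
    s.length ≤ fuel →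
    PySem.Chars.splitOn.go ['-'] fuel s cur acc = acc.reverse ++ fdHead cur.reverse (fdSp s) := by
  induction s with
  | nil =>
    intro fuel cur acc _
    cases fuel <;> simp [PySem.Chars.splitOn.go, fdSp, fdHead]
  | cons c rest ih =>
    intro fuel cur acc h
    cases fuel with
    | zero => simp at h
    | succ f =>
      simp only [PySem.Chars.splitOn.go]
      by_cases hc : c = '-'
      · subst hc
        rw [if_pos (by simp [List.isPrefixOf])]
        have hd : List.drop (['-'].length) ('-' :: rest) = rest := by simp
        rw [hd, ih f [] (cur.reverse :: acc) (by simp at h; omega)]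
        have hne := fdSp_ne_nil rest
        cases hsp : fdSp rest with
        | nil => exact absurd hsp hne
        | cons q qs => simp [fdSp, hsp, fdHead]
      · rw [if_neg (by simp [List.isPrefixOf]; exact fun h' => hc h'.symm)]
        simp only [List.length_cons] at h
        rw [ih f (c :: cur) acc (by omega)]
        have hne := fdSp_ne_nil rest
        cases hsp : fdSp rest with
        | nil => exact absurd hsp hne
        | cons q qs => cases qs <;> simp [fdSp, hsp, hc, fdHead]

theorem splitOn_eq (s : List Char) : PySem.Chars.splitOn s ['-'] = fdSp s := by
  rw [PySem.Chars.splitOn, splitOn_go_eq s (s.length + 1) [] [] (by omega)]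
  have hne := fdSp_ne_nil s
  cases hsp : fdSp s with
  | nil => exact absurd hsp hne
  | cons q qs => simp [fdHead]

-- A's per-string strip equals B's char-level strip
theorem fdStrip_ofList (p : List Char) : fdStrip (String.ofList p) = String.ofList (fdStripC p) := by
  apply String.toList_injective
  cases p with
  | nil => decide
  | cons c t =>
    by_cases hc : c = '0'
    · subst hc
      simp [fdStrip, fdStripC, PySem.Chars.startswith, List.isPrefixOf,
        PySem.List.slice_from_one]
    · simp [fdStrip, fdStripC, PySem.Chars.startswith, List.isPrefixOf, hc, Ne.symm hc]

-- fdCons reassociation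
theorem fdCons_assoc (acc : Option (List Char)) (x y : List Char) :
    fdCons (some (fdCons acc x)) y = fdCons acc (y ++ '.' :: x) := by
  cases acc <;> simp [fdCons]

-- what B's fold computes on the parts decomposition
def fdJ (buf : List Char) : List (List Char) → List Char
  | [] => fdStripC buf
  | [p] => fdStripC (buf ++ p)
  | p :: ps => fdJ [] ps ++ '.' :: fdStripC (buf ++ p)

theorem foldl_fdStep_eq (s : List Char) : ∀ (acc : Option (List Char)) (buf : List Char) (n : ℕ),
    (fdCons (s.foldl fdStep (acc, buf, n)).1 (fdStripC (s.foldl fdStep (acc, buf, n)).2.1),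
      (s.foldl fdStep (acc, buf, n)).2.2)
    = (fdCons acc (fdJ buf (fdSp s)), n + ((fdSp s).length - 1)) := by
  induction s with
  | nil => intro acc buf n; simp [fdSp, fdJ]
  | cons c rest ih =>
    intro acc buf n
    simp only [List.foldl_cons]
    by_cases hc : c = '-'
    · subst hc
      have hstep : fdStep (acc, buf, n) '-' = (some (fdCons acc (fdStripC buf)), [], n + 1) := by
        simp [fdStep]
      rw [hstep, ih]
      have hne := fdSp_ne_nil rest
      cases hsp : fdSp rest with
      | nil => exact absurd hsp hne
      | cons q qs =>
        cases qs with
        | nil => simp [fdSp, hsp, fdJ, fdCons_assoc]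
        | cons q2 qs2 =>
          simp only [fdSp, if_true, hsp, fdJ, List.nil_append, fdCons_assoc,
            List.length_cons, Prod.mk.injEq]
          exact ⟨by simp, by omega⟩
    · have hstep : fdStep (acc, buf, n) c = (acc, buf ++ [c], n) := by
        simp [fdStep, hc]
      rw [hstep, ih]
      have hne := fdSp_ne_nil rest
      cases hsp : fdSp rest with
      | nil => exact absurd hsp hne
      | cons q qs =>
        cases qs with
        | nil => simp [fdSp, hsp, hc, fdJ]
        | cons q2 qs2 => simp [fdSp, hsp, hc, fdJ]

-- ===== VERDICT (by name: the statement is the Claim_ definition above) =====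
theorem fancy_date_spec : Claim_equal_fancy_date := by
  intro date _
  unfold Spec_fancy_date fancy_date fancy_date_alt
  have hsplit : PySem.Str.split? date "-" = some ((fdSp date.toList).map String.ofList) := by
    simp [PySem.Str.split?, PySem.Chars.split?, splitOn_eq]
  rw [hsplit]
  have hfold := foldl_fdStep_eq date.toList none [] 0
  have hne := fdSp_ne_nil date.toList
  cases hfo : date.toList.foldl fdStep (none, [], 0) with
  | mk acc rest =>
    cases rest with
    | mk buf n =>
      rw [hfo] at hfold
      have h1 : fdCons acc (fdStripC buf) = fdCons none (fdJ [] (fdSp date.toList)) := by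
        have := congrArg Prod.fst hfold; simpa using this
      have h2 : n = (fdSp date.toList).length - 1 := by
        have := congrArg Prod.snd hfold; simpa using this
      cases hsp : fdSp date.toList with
      | nil => exact absurd hsp hne
      | cons p ps =>
        rw [hsp] at h1 h2
        simp only [List.length_cons] at h2
        cases ps with
        | nil =>
          simp only [Option.getD_some, List.map, List.length_nil] at *
          rw [if_pos (by omega), h1]
          simp only [fdJ, fdCons, Option.elim_none, List.nil_append]
          exact fdStrip_ofList p
        | cons q qs =>
          cases qs with
          | nil =>
            simp only [Option.getD_some, List.map, List.length_cons, List.length_nil] at *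
            rw [if_pos (by omega), h1]
            simp only [fdJ, fdCons, Option.elim_none, List.nil_append]
            rw [fdStrip_ofList, fdStrip_ofList]
            apply String.toList_injective
            simp
          | cons r rs =>
            cases rs with
            | nil =>
              simp only [Option.getD_some, List.map, List.length_cons, List.length_nil] at *
              rw [if_pos (by omega), h1]
              simp only [fdJ, fdCons, Option.elim_none, List.nil_append]
              rw [fdStrip_ofList, fdStrip_ofList, fdStrip_ofList]
              apply String.toList_injective
              simp
            | cons t ts =>
              simp only [Option.getD_some, List.map, List.length_cons] at *
              rw [if_neg (by omega)]
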